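-- pv_equiv track=rewrite | github.com/pthomasfournet/nytspellingbeesolver | src/spelling_bee_solver/intelligent_word_filter.py | _has_impossible_combinations
-- ===== SOURCE A (Python) =====
-- def _has_impossible_combinations(word: str) -> bool:
--     """Check for letter combinations that don't occur in English."""
--     impossible_combos = [
--         'bx', 'cx', 'dx', 'fx', 'gx', 'hx', 'jx', 'kx', 'lx', 'mx',
--         'nx', 'px', 'qx', 'rx', 'sx', 'tx', 'vx', 'wx', 'xx', 'yx', 'zx',
--         'qw', 'qy', 'qz', 'qq',
--         'wq', 'ww', 'wy', 'wz',
--         'xq', 'xw', 'xx', 'xy', 'xz',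
--     ]
--
--     for combo in impossible_combos:
--         if combo in word:
--             return True
--     return False
-- ===== SOURCE B (Python) =====
-- _IMPOSSIBLE = frozenset([
--     'bx', 'cx', 'dx', 'fx', 'gx', 'hx', 'jx', 'kx', 'lx', 'mx',
--     'nx', 'px', 'qx', 'rx', 'sx', 'tx', 'vx', 'wx', 'xx', 'yx', 'zx',
--     'qw', 'qy', 'qz', 'qq',
--     'wq', 'ww', 'wy', 'wz',
--     'xq', 'xw', 'xx', 'xy', 'xz',
-- ])
--
--
-- def _has_impossible_combinations(word: str) -> bool:
--     """Check for letter combinations that don't occur in English."""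
--     for a, b in zip(word, word[1:]):
--         if a + b in _IMPOSSIBLE:
--             return True
--     return False
-- ===== Notes on version B (the rewrite author's own statement) =====
-- stated objective: idiomatic
-- what changed: B walks the word's adjacent character pairs once and tests each bigram against a frozenset built once, instead of A's loop over 34 patterns each doing a substring scan of the word.
import Mathlib
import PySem

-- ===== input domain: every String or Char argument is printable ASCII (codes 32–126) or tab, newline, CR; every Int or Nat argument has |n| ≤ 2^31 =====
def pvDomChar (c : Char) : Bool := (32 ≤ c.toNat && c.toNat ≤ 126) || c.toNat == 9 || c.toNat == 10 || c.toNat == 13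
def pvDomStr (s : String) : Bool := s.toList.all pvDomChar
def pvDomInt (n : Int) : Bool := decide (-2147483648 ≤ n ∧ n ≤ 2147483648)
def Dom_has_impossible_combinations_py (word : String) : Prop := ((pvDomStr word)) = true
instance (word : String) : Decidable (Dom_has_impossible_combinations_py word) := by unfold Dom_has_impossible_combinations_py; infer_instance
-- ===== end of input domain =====

-- B replaces A's 34 substring scans of the word by one pass over the word's adjacent
-- character pairs with a set membership test (idiomatic; same result on every input).

-- ===== PORT A =====
-- A's literal pattern list (duplicate 'xx' kept, as in the Python source)
def pvCombos : List String :=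
  ["bx", "cx", "dx", "fx", "gx", "hx", "jx", "kx", "lx", "mx",
   "nx", "px", "qx", "rx", "sx", "tx", "vx", "wx", "xx", "yx", "zx",
   "qw", "qy", "qz", "qq",
   "wq", "ww", "wy", "wz",
   "xq", "xw", "xx", "xy", "xz"]

-- early-return 'for combo in …: if combo in word: return True' / 'return False'
def has_impossible_combinations_py (word : String) : Bool :=
  pvCombos.any (fun combo => PySem.Str.isIn combo word)

-- ===== PORT B =====
-- the same bigrams as character pairs, fed to frozenset(…) = dedup
def pvBigrams : List (Char × Char) :=
  [('b','x'), ('c','x'), ('d','x'), ('f','x'), ('g','x'), ('h','x'), ('j','x'),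
   ('k','x'), ('l','x'), ('m','x'), ('n','x'), ('p','x'), ('q','x'), ('r','x'),
   ('s','x'), ('t','x'), ('v','x'), ('w','x'), ('x','x'), ('y','x'), ('z','x'),
   ('q','w'), ('q','y'), ('q','z'), ('q','q'),
   ('w','q'), ('w','w'), ('w','y'), ('w','z'),
   ('x','q'), ('x','w'), ('x','x'), ('x','y'), ('x','z')]

def pvImpossibleSet : PySem.Set (Char × Char) := PySem.Set.ofList pvBigrams

-- 'for a, b in zip(word, word[1:]): if a + b in _IMPOSSIBLE: return True' / 'return False'
def pvScanPairs : List Char → Bool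
  | a :: b :: rest =>
      if (a, b) ∈ pvImpossibleSet then true else pvScanPairs (b :: rest)
  | _ => false

def has_impossible_combinations_py_alt (word : String) : Bool :=
  pvScanPairs word.toList

-- ===== PRECONDITION & SPEC =====
def Spec_has_impossible_combinations_py (word : String) (out : Bool) : Prop := out = has_impossible_combinations_py_alt word
instance (word : String) (out : Bool) : Decidable (Spec_has_impossible_combinations_py word out) := by unfold Spec_has_impossible_combinations_py; infer_instance

-- ===== CLAIM (what is proved, stated in full; the proofs are below) =====
def Claim_equal_has_impossible_combinations_py : Prop := ∀ (word : String), Dom_has_impossible_combinations_py word → Spec_has_impossible_combinations_py word (has_impossible_combinations_py word)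

-- ===== LEMMAS AND PROOFS =====

-- a two-character pattern is an infix of l iff it occurs as an adjacent pair of l
theorem pv_infix_pair (x y : Char) (l : List Char) :
    ([x, y] <:+: l) ↔ (x, y) ∈ l.zip l.tail := by
  induction l with
  | nil => simp
  | cons a t ih =>
    rw [List.infix_cons_iff]
    cases t with
    | nil =>
      simp [List.IsPrefix]
    | cons b u =>
      constructor
      · rintro (hp | hi)
        · obtain ⟨r, hr⟩ := hp
          simp at hr
          obtain ⟨h1, h2, _⟩ := hr
          subst h1; subst h2
          simp
        · have h2 := ih.mp hi
          simp at h2 ⊢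
          tauto
      · intro hm
        simp at hm
        rcases hm with ⟨h1, h2⟩ | hm
        · subst h1; subst h2
          exact Or.inl ⟨u, by simp⟩
        · exact Or.inr (ih.mpr (by simpa using hm))

theorem pv_scan_eq_any (l : List Char) :
    pvScanPairs l = (l.zip l.tail).any (fun p => decide (p ∈ pvImpossibleSet)) := by
  induction l with
  | nil => simp [pvScanPairs]
  | cons a t ih =>
    cases t with
    | nil => simp [pvScanPairs]
    | cons b u =>
      rw [pvScanPairs]
      by_cases h : (a, b) ∈ pvImpossibleSet <;> simp [h, ih]

theorem pv_mem_set_iff (p : Char × Char) : p ∈ pvImpossibleSet ↔ p ∈ pvBigrams := by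
  unfold pvImpossibleSet
  exact PySem.Set.mem_ofList ..

theorem pv_combos_eq : pvCombos = pvBigrams.map (fun p => String.ofList [p.1, p.2]) := by
  decide

-- ===== VERDICT (by name: the statement is the Claim_ definition above) =====
theorem has_impossible_combinations_py_spec : Claim_equal_has_impossible_combinations_py := by
  intro word _
  unfold Spec_has_impossible_combinations_py
  unfold has_impossible_combinations_py has_impossible_combinations_py_alt
  rw [pv_scan_eq_any, pv_combos_eq]
  rw [Bool.eq_iff_iff]
  simp only [List.any_eq_true, List.any_map, Function.comp,
    PySem.Str.isIn_iff_infix, decide_eq_true_eq]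
  constructor
  · rintro ⟨p, hp, hinf⟩
    have : (p.1, p.2) ∈ word.toList.zip word.toList.tail := by
      have := (pv_infix_pair p.1 p.2 word.toList).mp (by simpa [String.toList_ofList] using hinf)
      exact this
    exact ⟨(p.1, p.2), this, (pv_mem_set_iff _).mpr hp⟩
  · rintro ⟨q, hq, hmem⟩
    refine ⟨(q.1, q.2), (pv_mem_set_iff _).mp hmem, ?_⟩
    have := (pv_infix_pair q.1 q.2 word.toList).mpr (by simpa using hq)
    simpa [String.toList_ofList] using this
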